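-- pv_equiv track=rewrite | github.com/AhsanABC-RP/bess-thor | scripts/audit_bag_motion_v2.py | group_segments
-- ===== SOURCE A (Python) =====
-- def group_segments(rows, min_bags=1):
--     """Collapse contiguous bags of the same class into segments."""
--     if not rows:
--         return []
--     segs = []
--     start = 0
--     for i in range(1, len(rows)):
--         if rows[i]["class"] != rows[start]["class"]:
--             segs.append((start, i - 1, rows[start]["class"]))
--             start = i
--     segs.append((start, len(rows) - 1, rows[start]["class"]))
--     return [(a, b, c) for a, b, c in segs if (b - a + 1) >= min_bags]
-- ===== SOURCE B (Python) =====
-- def group_segments(rows, min_bags=1):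
--     """Collapse contiguous bags of the same class into segments."""
--     if not rows:
--         return []
--     n = len(rows)
--     bounds = [0] + [i for i in range(1, n) if rows[i]["class"] != rows[i - 1]["class"]] + [n]
--     segs = [(s, e - 1, rows[s]["class"]) for s, e in zip(bounds, bounds[1:])]
--     return [(a, b, c) for a, b, c in segs if (b - a + 1) >= min_bags]
-- ===== Notes on version B (the rewrite author's own statement) =====
-- stated objective: alternative
-- what changed: B replaces A's single stateful loop carrying (segs, start) by two stateless passes: first a list of boundary indices where the class changes, then a construction of segments from consecutive boundary pairs.
import Mathlib
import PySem

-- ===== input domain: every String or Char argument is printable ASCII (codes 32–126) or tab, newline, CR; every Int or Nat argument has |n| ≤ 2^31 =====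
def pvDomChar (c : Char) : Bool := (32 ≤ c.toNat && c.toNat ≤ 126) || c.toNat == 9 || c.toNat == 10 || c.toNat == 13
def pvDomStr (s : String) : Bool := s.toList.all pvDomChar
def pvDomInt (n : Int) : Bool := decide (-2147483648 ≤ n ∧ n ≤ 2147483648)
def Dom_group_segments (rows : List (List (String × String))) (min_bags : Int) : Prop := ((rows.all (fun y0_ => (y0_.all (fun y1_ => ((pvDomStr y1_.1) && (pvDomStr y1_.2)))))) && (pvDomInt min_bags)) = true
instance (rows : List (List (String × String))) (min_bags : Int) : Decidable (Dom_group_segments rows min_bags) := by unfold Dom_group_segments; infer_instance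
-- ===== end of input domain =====

-- B restates A's single stateful run-length loop as two stateless passes (boundary
-- indices, then consecutive boundary pairs); same O(n) cost, different decomposition.

-- ===== PORT A =====
-- rows[i]["class"]; within Pre_ the key is present and i is in range, so the defaults never fire.
def pvClassAt (rows : List (List (String × String))) (i : Int) : String :=
  (PySem.Dict.get? (PySem.Dict.mk (PySem.List.pyGetD rows i [])) "class").getD ""

def group_segments (rows : List (List (String × String))) (min_bags : Int) : List (Int × Int × String) :=
  if rows = [] then []
  else
    let n : Int := rows.length
    let st := (PySem.List.pyRange 1 n 1).foldl
      (fun (st : List (Int × Int × String) × Int) i =>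
        if pvClassAt rows i ≠ pvClassAt rows st.2 then
          (st.1 ++ [(st.2, i - 1, pvClassAt rows st.2)], i)
        else st)
      ([], 0)
    (st.1 ++ [(st.2, n - 1, pvClassAt rows st.2)]).filter
      (fun t => decide (t.2.1 - t.1 + 1 ≥ min_bags))

-- ===== PORT B =====
def group_segments_alt (rows : List (List (String × String))) (min_bags : Int) : List (Int × Int × String) :=
  if rows = [] then []
  else
    let n : Int := rows.length
    let bounds : List Int :=
      0 :: ((PySem.List.pyRange 1 n 1).filter
              (fun i => pvClassAt rows i ≠ pvClassAt rows (i - 1)) ++ [n])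
    let segs := (bounds.zip bounds.tail).map (fun se => (se.1, se.2 - 1, pvClassAt rows se.1))
    segs.filter (fun t => decide (t.2.1 - t.1 + 1 ≥ min_bags))

-- ===== PRECONDITION & SPEC =====
-- Pre_ excludes exactly the inputs where Python A raises KeyError: some row without a "class" key.
def Pre_group_segments (rows : List (List (String × String))) (min_bags : Int) : Prop :=
  rows.all (fun r => (PySem.Dict.get? (PySem.Dict.mk r) "class").isSome) = true
instance (rows : List (List (String × String))) (min_bags : Int) : Decidable (Pre_group_segments rows min_bags) := by unfold Pre_group_segments; infer_instance

def pvWitness_group_segments : (List (List (String × String))) × Int :=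
  ([[("class", "a")], [("class", "a")], [("class", "b")]], 1)

def Spec_group_segments (rows : List (List (String × String))) (min_bags : Int) (out : List (Int × Int × String)) : Prop := out = group_segments_alt rows min_bags
instance (rows : List (List (String × String))) (min_bags : Int) (out : List (Int × Int × String)) : Decidable (Spec_group_segments rows min_bags out) := by unfold Spec_group_segments; infer_instance

-- ===== CLAIM (what is proved, stated in full; the proofs are below) =====
def Claim_equal_group_segments : Prop := ∀ (rows : List (List (String × String))) (min_bags : Int), Dom_group_segments rows min_bags → Pre_group_segments rows min_bags → Spec_group_segments rows min_bags (group_segments rows min_bags)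

-- ===== LEMMAS AND PROOFS =====

-- last element of a boundary list (boundary lists are never empty; 0 is a dummy default)
def pvLast : List Int → Int
  | [] => 0
  | [a] => a
  | _ :: b :: t => pvLast (b :: t)

-- segments from consecutive boundary pairs (B's second pass, abstracted over the class map)
def pvSegs (c : Int → String) (l : List Int) : List (Int × Int × String) :=
  (l.zip l.tail).map (fun se => (se.1, se.2 - 1, c se.1))

-- A's processed boundaries after scanning indices 1..m-1
def pvB (c : Int → String) (m : Int) : List Int :=
  0 :: (PySem.List.pyRange 1 m 1).filter (fun i => c i ≠ c (i - 1))

theorem pvLast_cons_cons (a b : Int) (t : List Int) :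
    pvLast (a :: b :: t) = pvLast (b :: t) := rfl

theorem pvLast_append (a : Int) (l : List Int) (x : Int) :
    pvLast ((a :: l) ++ [x]) = x := by
  induction l generalizing a with
  | nil => rfl
  | cons b t ih => simpa [pvLast_cons_cons] using ih b

theorem pvSegs_append (c : Int → String) (a : Int) (l : List Int) (x : Int) :
    pvSegs c ((a :: l) ++ [x]) =
      pvSegs c (a :: l) ++ [(pvLast (a :: l), x - 1, c (pvLast (a :: l)))] := by
  induction l generalizing a with
  | nil => rfl
  | cons b t ih =>
      simp only [List.cons_append, pvSegs, List.zip_cons_cons, List.tail_cons, List.map_cons,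
        pvLast_cons_cons] at *
      exact congrArg _ (ih b)

theorem pvB_cons (c : Int → String) (m : Int) :
    pvB c m = 0 :: (pvB c m).tail := by simp [pvB]

-- the loop invariant: A's fold over pyRange 1 m 1 computes B's boundary presentation,
-- and the class at the last boundary equals the class at m-1
theorem pvInv (c : Int → String) (k : Nat) :
    ((PySem.List.pyRange 1 (1 + (k : Int)) 1).foldl
        (fun (st : List (Int × Int × String) × Int) i =>
          if c i ≠ c st.2 then (st.1 ++ [(st.2, i - 1, c st.2)], i) else st)
        ([], 0)
      = (pvSegs c (pvB c (1 + (k : Int))), pvLast (pvB c (1 + (k : Int)))))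
    ∧ c (pvLast (pvB c (1 + (k : Int)))) = c (1 + (k : Int) - 1) := by
  induction k with
  | zero =>
      constructor
      · simp [PySem.List.pyRange_one_eq_nil, pvB, pvSegs, pvLast]
      · simp [pvB, PySem.List.pyRange_one_eq_nil, pvLast]
  | succ k ih =>
      obtain ⟨ihfold, ihcls⟩ := ih
      have e : (1 : Int) + (k : Int) - 1 = (k : Int) := by omega
      rw [e] at ihcls
      have hm : (1 : Int) ≤ 1 + (k : Int) := by omega
      have hrange : PySem.List.pyRange 1 (1 + ((k : Int) + 1)) 1
          = PySem.List.pyRange 1 (1 + (k : Int)) 1 ++ [1 + (k : Int)] := by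
        have := PySem.List.pyRange_one_succ_right (a := 1) (b := 1 + (k : Int)) hm
        simpa [add_assoc] using this
      push_cast
      rw [hrange, List.foldl_append, ihfold]
      simp only [List.foldl_cons, List.foldl_nil]
      by_cases hc : c (1 + (k : Int)) = c ((k : Int))
      · have hB : pvB c (1 + ((k : Int) + 1)) = pvB c (1 + (k : Int)) := by
          simp [pvB, hrange, List.filter_append, List.filter, e, hc]
        have hcond : ¬ c (1 + (k : Int)) ≠ c (pvLast (pvB c (1 + (k : Int)))) := by
          rw [ihcls]; simpa using hc
        rw [if_neg hcond, hB]
        refine ⟨rfl, ?_⟩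
        have e2 : (1 : Int) + ((k : Int) + 1) - 1 = 1 + (k : Int) := by omega
        rw [e2, ihcls, hc]
      · have hB : pvB c (1 + ((k : Int) + 1)) = pvB c (1 + (k : Int)) ++ [1 + (k : Int)] := by
          simp [pvB, hrange, List.filter_append, List.filter, e, hc]
        have hcond : c (1 + (k : Int)) ≠ c (pvLast (pvB c (1 + (k : Int)))) := by
          rw [ihcls]; simpa using hc
        rw [if_pos hcond, hB]
        constructor
        · rw [pvB_cons c (1 + (k : Int)), pvSegs_append, pvLast_append,
            ← pvB_cons c (1 + (k : Int))]
        · rw [pvB_cons c (1 + (k : Int)), pvLast_append]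
          congr 1
          omega

-- ===== VERDICT (by name: the statement is the Claim_ definition above) =====
theorem group_segments_spec : Claim_equal_group_segments := by
  intro rows min_bags _hdom _hpre
  unfold Spec_group_segments group_segments group_segments_alt
  by_cases hnil : rows = []
  · simp [hnil]
  · rw [if_neg hnil, if_neg hnil]
    simp only []
    have hlen : 1 ≤ rows.length := List.length_pos_iff.mpr hnil
    set c := pvClassAt rows with hc
    obtain ⟨k, hk⟩ : ∃ k : Nat, rows.length = 1 + k := ⟨rows.length - 1, by omega⟩
    have hki : (rows.length : Int) = 1 + (k : Int) := by exact_mod_cast hk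
    obtain ⟨hfold, _⟩ := pvInv c k
    rw [hki, hfold]
    congr 1
    have hbounds : (0 : Int) :: ((PySem.List.pyRange 1 (1 + (k : Int)) 1).filter
          (fun i => decide (c i ≠ c (i - 1))) ++ [1 + (k : Int)])
        = pvB c (1 + (k : Int)) ++ [1 + (k : Int)] := by
      simp [pvB]
    show pvSegs c (pvB c (1 + (k : Int)))
        ++ [(pvLast (pvB c (1 + (k : Int))), 1 + (k : Int) - 1, c (pvLast (pvB c (1 + (k : Int)))))]
      = pvSegs c ((0 : Int) :: ((PySem.List.pyRange 1 (1 + (k : Int)) 1).filter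
          (fun i => decide (c i ≠ c (i - 1))) ++ [1 + (k : Int)]))
    rw [hbounds, pvB_cons c (1 + (k : Int)), pvSegs_append]
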